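-- pv_equiv track=rewrite | github.com/Zhang-Wenwen/FedCMT | src/utils/transforms/label_op.py | _check_invertible
-- ===== SOURCE A (Python) =====
-- from typing import List, Dict
--
-- def _check_invertible(permuted_labels: List[List[int]]):
--     """
--         Raises error if `permuted_labels` is not inversible
--     """
--     inverse_permute_dict: Dict[int, List[int]] = {}
--     for channel_idx, target_labels in enumerate(permuted_labels):
--         for target_label in target_labels:
--             if target_label not in inverse_permute_dict: inverse_permute_dict[target_label] = []
--             inverse_permute_dict[target_label].append(channel_idx)
--     inverse_permute_list = [inverse_permute_dict[k] for k in inverse_permute_dict]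
--     for i in range(len(inverse_permute_list)):
--         assert inverse_permute_list[i] not in inverse_permute_list[i + 1:], f"permuted_labels {permuted_labels} is not invertible"
--     return inverse_permute_dict
-- ===== SOURCE B (Python) =====
-- def _check_invertible(permuted_labels):
--     """
--         Raises error if `permuted_labels` is not inversible
--     """
--     # collect the distinct target labels in first-occurrence order
--     seen = set()
--     keys = []
--     for target_labels in permuted_labels:
--         for t in target_labels:
--             if t not in seen:
--                 seen.add(t)
--                 keys.append(t)
--     # for each label, its channel indices (with multiplicity) in one per-key scan
--     inverse_permute_dict = {
--         t: [channel_idx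
--             for channel_idx, row in enumerate(permuted_labels)
--             for _ in range(row.count(t))]
--         for t in keys
--     }
--     # invertible iff no two labels share a channel list: sort, compare neighbours
--     sorted_vals = sorted(tuple(v) for v in inverse_permute_dict.values())
--     for i in range(1, len(sorted_vals)):
--         assert sorted_vals[i] != sorted_vals[i - 1], f"permuted_labels {permuted_labels} is not invertible"
--     return inverse_permute_dict
-- ===== Notes on version B (the rewrite author's own statement) =====
-- stated objective: alternative
-- what changed: B collects the distinct labels once with a seen-set, builds each label's channel list by a per-label counting pass over the rows (instead of A's single setdefault/append pass), and verifies invertibility by sorting the value lists and comparing neighbours instead of A's quadratic pairwise 'not in' scan over tail slices.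
import Mathlib
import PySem

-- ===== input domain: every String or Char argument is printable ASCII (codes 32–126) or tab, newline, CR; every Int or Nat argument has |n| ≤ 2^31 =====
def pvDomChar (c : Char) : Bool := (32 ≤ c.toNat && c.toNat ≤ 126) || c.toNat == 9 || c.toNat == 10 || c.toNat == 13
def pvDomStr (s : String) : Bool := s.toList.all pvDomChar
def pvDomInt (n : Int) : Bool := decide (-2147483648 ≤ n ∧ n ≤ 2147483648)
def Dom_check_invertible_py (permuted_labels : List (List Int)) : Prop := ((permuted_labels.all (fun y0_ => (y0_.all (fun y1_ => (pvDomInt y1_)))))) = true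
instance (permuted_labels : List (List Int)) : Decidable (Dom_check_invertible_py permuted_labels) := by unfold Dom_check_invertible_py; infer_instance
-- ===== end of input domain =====

-- B rebuilds the inverse mapping by a different traversal (distinct keys first, then one
-- counting pass per key) and checks invertibility by sort-and-compare-neighbours instead
-- of A's quadratic pairwise membership scan; objective: alternative algorithm.
-- The assert phases only raise (such inputs are excluded by Pre_) and never change the
-- returned value, so neither port carries them.

-- ===== PORT A =====
def check_invertible_py (permuted_labels : List (List Int)) : List (Int × List Int) :=
  -- for channel_idx, target_labels in enumerate(...): for target_label in target_labels:
  --   if target_label not in d: d[target_label] = []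
  --   d[target_label].append(channel_idx)
  ((PySem.List.enumerate permuted_labels).foldl
    (fun d p => p.2.foldl
      (fun (d : PySem.Dict Int (List Int)) t =>
        let d := if d.contains t then d else d.insert t []
        d.modify t [] (fun l => l ++ [p.1]))
      d)
    PySem.Dict.empty).items
  -- the 'assert inverse_permute_list[i] not in inverse_permute_list[i+1:]' loop only
  -- raises (outside Pre_) and does not affect the returned dict

-- ===== PORT B =====
def check_invertible_py_alt (permuted_labels : List (List Int)) : List (Int × List Int) :=
  -- seen = set(); keys = []; for row: for t in row: if t not in seen: add t to both
  ((permuted_labels.foldl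
    (fun st row => row.foldl
      (fun (st : PySem.Set Int × List Int) t =>
        if PySem.Set.contains st.1 t then st else (PySem.Set.add st.1 t, st.2 ++ [t]))
      st)
    ((PySem.Set.empty : PySem.Set Int), ([] : List Int))).2).map
  -- dict comprehension over the distinct keys: its items are exactly this map
    (fun t => (t,
      (PySem.List.enumerate permuted_labels).flatMap
        (fun p => List.replicate (PySem.List.count p.2 t) p.1)))
  -- the sorted-values adjacent-equality assert only raises (outside Pre_)

-- ===== PRECONDITION & SPEC =====
-- occurrence list of label t: each channel index, repeated by its multiplicity in that
-- channel's row (a proof-free restatement of the inverse mapping, used only by Pre_)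
def pvOcc (permuted_labels : List (List Int)) (t : Int) : List Int :=
  (List.range permuted_labels.length).flatMap
    (fun i => List.replicate ((permuted_labels.getD i []).count t) (i : Int))

-- Pre_ excludes exactly the inputs on which A raises AssertionError ("is not invertible"):
-- those where two distinct labels have the same channel-occurrence list.
def Pre_check_invertible_py (permuted_labels : List (List Int)) : Prop :=
  List.Pairwise (fun a b => pvOcc permuted_labels a ≠ pvOcc permuted_labels b)
    (PySem.List.dedup permuted_labels.flatten)
instance (permuted_labels : List (List Int)) : Decidable (Pre_check_invertible_py permuted_labels) := by
  unfold Pre_check_invertible_py; infer_instance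

def pvWitness_check_invertible_py : List (List Int) := [[0], [1]]

def Spec_check_invertible_py (permuted_labels : List (List Int)) (out : List (Int × List Int)) : Prop := out = check_invertible_py_alt permuted_labels
instance (permuted_labels : List (List Int)) (out : List (Int × List Int)) : Decidable (Spec_check_invertible_py permuted_labels out) := by unfold Spec_check_invertible_py; infer_instance

-- ===== CLAIM (what is proved, stated in full; the proofs are below) =====
def Claim_equal_check_invertible_py : Prop := ∀ (permuted_labels : List (List Int)), Dom_check_invertible_py permuted_labels → Pre_check_invertible_py permuted_labels → Spec_check_invertible_py permuted_labels (check_invertible_py permuted_labels)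

-- ===== LEMMAS AND PROOFS =====

-- the flattened (label, channel) stream both programs group over
def pvStream (permuted_labels : List (List Int)) : List (Int × Int) :=
  (PySem.List.enumerate permuted_labels).flatMap (fun p => p.2.map (fun t => (t, p.1)))

-- a fold over a flatMap is the nested fold
theorem pv_foldl_flatMap {α β γ : Type} (l : List α) (g : α → List β) (f : γ → β → γ) (d : γ) :
    (l.flatMap g).foldl f d = l.foldl (fun d x => (g x).foldl f d) d := by
  induction l generalizing d with
  | nil => rfl
  | cons a l ih => simp [List.flatMap_cons, List.foldl_append, ih]

-- A's loop body is exactly Dict.modify with default []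
theorem pv_stepA_eq_modify (d : PySem.Dict Int (List Int)) (t : Int) (c : Int) :
    (let d' := if d.contains t then d else d.insert t []
     d'.modify t [] (fun l => l ++ [c])) = d.modify t [] (fun l => l ++ [c]) := by
  by_cases h : d.contains t
  · simp [h]
  · simp only [Bool.not_eq_true] at h
    have hg : d.getD t ([] : List Int) = [] := by
      simp [PySem.Dict.getD_of_not_contains, h]
    simp [h, PySem.Dict.modify, PySem.Dict.insert_insert_self,
      PySem.Dict.getD_insert_self, hg]

-- the labels of the stream are the flattened input
theorem pv_stream_map_fst (pl : List (List Int)) :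
    (pvStream pl).map Prod.fst = pl.flatten := by
  unfold pvStream
  rw [List.map_flatMap]
  have hb : (fun a : Int × List Int => List.map Prod.fst (List.map (fun t => (t, a.1)) a.2))
      = fun a : Int × List Int => a.2 := by
    funext a; simp [Function.comp_def]
  rw [hb]
  have h : ∀ (l : List (List Int)) (s : Int),
      (PySem.List.enumerate l s).flatMap (fun p : Int × List Int => p.2) = l.flatten := by
    intro l
    induction l with
    | nil => intro s; rfl
    | cons r l ih => intro s; simp [PySem.List.enumerate_cons, ih]
  exact h pl 0

-- per-row: filtering the paired row for label k and dropping to channels is a replicate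
theorem pv_row_filter (row : List Int) (c : Int) (k : Int) :
    List.map (fun x : Int × Int => x.2)
        (List.filter (fun q => q.1 == k) (row.map (fun t => (t, c))))
      = List.replicate (row.count k) c := by
  induction row with
  | nil => rfl
  | cons t row ih =>
    by_cases h : t = k
    · simp [h, ih, List.replicate_succ]
    · simp [h, ih]

-- A's value at key k = B's value at key k
theorem pv_values_eq (pl : List (List Int)) (k : Int) :
    List.map (fun x : Int × Int => x.2) (List.filter (fun q => q.1 == k) (pvStream pl))
      = (PySem.List.enumerate pl).flatMap
          (fun p => List.replicate (PySem.List.count p.2 k) p.1) := by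
  unfold pvStream
  rw [List.filter_flatMap, List.map_flatMap]
  refine List.flatMap_congr (fun p _ => ?_)
  simp only [PySem.List.count_eq]
  exact pv_row_filter p.2 p.1 k

-- B's key loop: from a doubled state it is Set.update on both components
theorem pv_keyloop_row (row : List Int) (s : PySem.Set Int) :
    row.foldl
      (fun (st : PySem.Set Int × List Int) t =>
        if PySem.Set.contains st.1 t then st else (PySem.Set.add st.1 t, st.2 ++ [t]))
      (s, s) = (PySem.Set.update s row, PySem.Set.update s row) := by
  induction row generalizing s with
  | nil => rfl
  | cons t row ih =>
    simp only [List.foldl_cons, PySem.Set.update] at *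
    by_cases h : t ∈ s
    · have ha : PySem.Set.add s t = s := by simp [PySem.Set.add, h]
      simpa [h, ha] using ih s
    · have ha : PySem.Set.add s t = s ++ [t] := by
        simp [PySem.Set.add, h]
      simpa [h, ha] using ih (s ++ [t])

theorem pv_keyloop (pl : List (List Int)) (s : PySem.Set Int) :
    pl.foldl
      (fun st row => row.foldl
        (fun (st : PySem.Set Int × List Int) t =>
          if PySem.Set.contains st.1 t then st else (PySem.Set.add st.1 t, st.2 ++ [t]))
        st)
      (s, s) = (PySem.Set.update s pl.flatten, PySem.Set.update s pl.flatten) := by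
  induction pl generalizing s with
  | nil => rfl
  | cons row pl ih =>
    simp only [List.foldl_cons, pv_keyloop_row, List.flatten_cons]
    rw [ih (PySem.Set.update s row)]
    simp [PySem.Set.update, List.foldl_append]

theorem check_invertible_py_eq_alt (pl : List (List Int)) :
    check_invertible_py pl = check_invertible_py_alt pl := by
  unfold check_invertible_py check_invertible_py_alt
  have hfun : (fun (d : PySem.Dict Int (List Int)) (p : Int × List Int) => p.2.foldl
        (fun (d : PySem.Dict Int (List Int)) t =>
          let d := if d.contains t then d else d.insert t []
          d.modify t [] (fun l => l ++ [p.1]))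
        d)
      = (fun d p => (p.2.map (fun t => (t, p.1))).foldl
          (fun (d : PySem.Dict Int (List Int)) q => d.modify q.1 [] (fun l => l ++ [q.2])) d) := by
    funext d p
    rw [List.foldl_map]
    congr 1
    funext d t
    exact pv_stepA_eq_modify d t p.1
  rw [hfun, ← pv_foldl_flatMap]
  have hnodup : ((pvStream pl).foldl
      (fun (d : PySem.Dict Int (List Int)) q => d.modify q.1 [] (fun l => l ++ [q.2]))
      PySem.Dict.empty).keys.Nodup :=
    PySem.Dict.nodup_keys_foldl_modify_key (pvStream pl) Prod.fst []
      (fun _ q => fun l => l ++ [q.2]) PySem.Dict.empty (by simp)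
  rw [show (PySem.List.enumerate pl).flatMap (fun p => p.2.map (fun t => (t, p.1))) = pvStream pl from rfl]
  rw [PySem.Dict.items_eq_map_keys _ hnodup []]
  rw [PySem.Dict.keys_foldl_modify_key (pvStream pl) Prod.fst [] (fun _ q => fun l => l ++ [q.2]),
      show ((PySem.Set.empty : PySem.Set Int), ([] : List Int))
          = ((PySem.Set.empty : PySem.Set Int), (PySem.Set.empty : PySem.Set Int)) from rfl,
      pv_keyloop]
  have hkeys : PySem.Set.update (PySem.Dict.empty : PySem.Dict Int (List Int)).keys ((pvStream pl).map Prod.fst)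
      = PySem.Set.update (PySem.Set.empty : PySem.Set Int) pl.flatten := by
    rw [pv_stream_map_fst]; rfl
  rw [hkeys]
  refine List.map_congr_left ?_
  intro k _
  rw [PySem.Dict.getD_foldl_modify_append, PySem.Dict.getD_empty]
  simpa using congrArg (fun v => ((k : Int), v)) (pv_values_eq pl k)

-- ===== VERDICT (by name: the statement is the Claim_ definition above) =====
theorem check_invertible_py_spec : Claim_equal_check_invertible_py := by
  intro pl _ _
  unfold Spec_check_invertible_py
  exact check_invertible_py_eq_alt pl
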